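-- pv_equiv track=rewrite | github.com/vadim566/laragames | SVN/trunk/Code/Python/lara_flashcards.py | add_pos_and_context
-- ===== SOURCE A (Python) =====
-- def add_audio_context(Word, Translation, POS, TextContext, SegmentAudio):
--     for S in SegmentAudio:
--         if TextContext == S['text']:
--             return (Word, Translation, POS, TextContext, f"{S['file'].replace('.wav', '.mp3')}")
--     return (Word, Translation, POS, TextContext, '')
--
-- def add_pos_and_context(Pairs, WordPOSData, SegmentAudio):
--     if WordPOSData:
--         NoDuplicatePOS = []
--         [NoDuplicatePOS.append(w) for w in WordPOSData if w not in NoDuplicatePOS]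
--
--     TranslationPairsWithPOS = []
--     for Pair in Pairs:
--         if WordPOSData:
--             for Word in NoDuplicatePOS:
--                 if Word[0] == Pair[1]:
--                         TranslationPairsWithPOS.append(add_audio_context(Pair[0], Pair[1], Word[2], Pair[2], SegmentAudio))
--                         break
--         else:
--             TranslationPairsWithPOS.append(add_audio_context(Pair[0], Pair[1], '', Pair[2], SegmentAudio))
--     return TranslationPairsWithPOS
-- ===== SOURCE B (Python) =====
-- def add_pos_and_context(Pairs, WordPOSData, SegmentAudio):
--     # One pass over each input: dict keyed by word (first POS occurrence wins) and
--     # dict keyed by segment text (first well-formed segment wins; segments missing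
--     # 'text' or 'file' are ignored), then one dict-lookup pass over Pairs.
--     pos_of = {}
--     for w in WordPOSData:
--         pos_of.setdefault(w[0], w[2])
--     audio_of = {}
--     for s in SegmentAudio:
--         if 'text' in s and 'file' in s:
--             audio_of.setdefault(s['text'], s['file'].replace('.wav', '.mp3'))
--     result = []
--     for pair in Pairs:
--         if WordPOSData:
--             if pair[1] not in pos_of:
--                 continue
--             pos = pos_of[pair[1]]
--         else:
--             pos = ''
--         result.append((pair[0], pair[1], pos, pair[2], audio_of.get(pair[2], '')))
--     return result
-- ===== Notes on version B (the rewrite author's own statement) =====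
-- stated objective: alternative
-- what changed: Replaces the list dedup plus per-pair linear scans over the POS list and the audio segments by two first-occurrence dicts built once, with first-match semantics preserved; it trades A's repeated scanning for dictionary lookups.
import Mathlib
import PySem

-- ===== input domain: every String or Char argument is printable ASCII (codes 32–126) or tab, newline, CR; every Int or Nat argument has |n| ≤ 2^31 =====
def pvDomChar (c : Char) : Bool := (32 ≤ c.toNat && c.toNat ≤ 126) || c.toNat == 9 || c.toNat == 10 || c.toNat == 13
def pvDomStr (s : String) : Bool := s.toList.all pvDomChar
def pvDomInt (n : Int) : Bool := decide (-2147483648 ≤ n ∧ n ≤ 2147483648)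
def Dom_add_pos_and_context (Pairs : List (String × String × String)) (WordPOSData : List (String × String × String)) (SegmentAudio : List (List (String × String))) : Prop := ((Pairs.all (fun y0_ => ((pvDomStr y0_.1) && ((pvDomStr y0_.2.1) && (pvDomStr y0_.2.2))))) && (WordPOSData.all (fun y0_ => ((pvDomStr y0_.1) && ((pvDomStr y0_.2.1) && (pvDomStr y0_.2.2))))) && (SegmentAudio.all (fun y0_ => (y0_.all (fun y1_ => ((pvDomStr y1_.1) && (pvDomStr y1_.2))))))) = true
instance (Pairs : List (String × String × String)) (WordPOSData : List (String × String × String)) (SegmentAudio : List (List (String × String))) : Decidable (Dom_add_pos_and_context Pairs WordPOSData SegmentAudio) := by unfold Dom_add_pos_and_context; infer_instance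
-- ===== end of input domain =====

-- B replaces A's list dedup and per-pair scans by two first-occurrence dicts built once (objective: alternative).

-- ===== PORT A =====
-- S['text'] / S['file'] is a Python dict lookup (first match in the association list); Python raises
-- KeyError when the key is missing — exactly those runs are excluded by Pre_ below, the port uses default "".
def add_audio_context (Word : String) (Translation : String) (POS : String) (TextContext : String) (SegmentAudio : List (List (String × String))) : String × String × String × String × String :=
  match SegmentAudio with
  | [] => (Word, Translation, POS, TextContext, "")
  | S :: rest =>
    if TextContext == (PySem.Dict.mk S).getD "text" "" then
      (Word, Translation, POS, TextContext, PySem.Str.replace ((PySem.Dict.mk S).getD "file" "") ".wav" ".mp3")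
    else add_audio_context Word Translation POS TextContext rest

def add_pos_and_context (Pairs : List (String × String × String)) (WordPOSData : List (String × String × String)) (SegmentAudio : List (List (String × String))) : List (String × String × String × String × String) :=
  let NoDuplicatePOS := WordPOSData.foldl (fun acc w => if acc.contains w then acc else acc ++ [w]) []
  Pairs.foldl (fun acc Pair =>
    if !WordPOSData.isEmpty then
      -- inner for-loop with break = first element of NoDuplicatePOS whose [0] equals Pair[1]
      match NoDuplicatePOS.find? (fun Word => Word.1 == Pair.2.1) with
      | some Word => acc ++ [add_audio_context Pair.1 Pair.2.1 Word.2.2 Pair.2.2 SegmentAudio]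
      | none => acc
    else
      acc ++ [add_audio_context Pair.1 Pair.2.1 "" Pair.2.2 SegmentAudio]) []

-- ===== PORT B =====
def add_pos_and_context_alt (Pairs : List (String × String × String)) (WordPOSData : List (String × String × String)) (SegmentAudio : List (List (String × String))) : List (String × String × String × String × String) :=
  let pos_of : PySem.Dict String String :=
    WordPOSData.foldl (fun d w => d.setdefault w.1 w.2.2) PySem.Dict.empty
  let audio_of : PySem.Dict String String :=
    SegmentAudio.foldl (fun d s =>
      if (PySem.Dict.mk s).contains "text" && (PySem.Dict.mk s).contains "file" then
        d.setdefault ((PySem.Dict.mk s).getD "text" "")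
          (PySem.Str.replace ((PySem.Dict.mk s).getD "file" "") ".wav" ".mp3")
      else d) PySem.Dict.empty
  Pairs.foldl (fun acc pair =>
    if !WordPOSData.isEmpty then
      match pos_of.get? pair.2.1 with
      | none => acc
      | some pos => acc ++ [(pair.1, pair.2.1, pos, pair.2.2, audio_of.getD pair.2.2 "")]
    else
      acc ++ [(pair.1, pair.2.1, "", pair.2.2, audio_of.getD pair.2.2 "")]) []

-- ===== PRECONDITION & SPEC =====
-- A's audio scan for a context c stops at the first segment missing 'text' (KeyError) or whose 'text'
-- equals c (KeyError if that one misses 'file'); this says the scan for c completes without KeyError.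
def pvScanOK (SegmentAudio : List (List (String × String))) (c : String) : Prop :=
  ∀ S, SegmentAudio.find? (fun S => !(PySem.Dict.mk S).contains "text" || ((PySem.Dict.mk S).getD "text" "" == c)) = some S →
    ((PySem.Dict.mk S).contains "text" = true ∧ (PySem.Dict.mk S).contains "file" = true)

-- Pre_ excludes exactly the inputs on which Python A raises KeyError: some pair that gets a POS
-- (WordPOSData empty, or some word entry matches its translation) triggers an audio scan that hits a
-- segment dict missing 'text', or a matching segment missing 'file', before finding its match.
def Pre_add_pos_and_context (Pairs : List (String × String × String)) (WordPOSData : List (String × String × String)) (SegmentAudio : List (List (String × String))) : Prop :=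
  ∀ p ∈ Pairs, (WordPOSData = [] ∨ ∃ w ∈ WordPOSData, w.1 = p.2.1) → pvScanOK SegmentAudio p.2.2
instance (Pairs : List (String × String × String)) (WordPOSData : List (String × String × String)) (SegmentAudio : List (List (String × String))) : Decidable (Pre_add_pos_and_context Pairs WordPOSData SegmentAudio) := by unfold Pre_add_pos_and_context pvScanOK; infer_instance

def pvWitness_add_pos_and_context : (List (String × String × String)) × (List (String × String × String)) × (List (List (String × String))) :=
  ([("hi", "hola", "hola mundo")], [("hola", "l1", "NOUN")], [[("text", "hola mundo"), ("file", "a.wav")]])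

def Spec_add_pos_and_context (Pairs : List (String × String × String)) (WordPOSData : List (String × String × String)) (SegmentAudio : List (List (String × String))) (out : List (String × String × String × String × String)) : Prop := out = add_pos_and_context_alt Pairs WordPOSData SegmentAudio
instance (Pairs : List (String × String × String)) (WordPOSData : List (String × String × String)) (SegmentAudio : List (List (String × String))) (out : List (String × String × String × String × String)) : Decidable (Spec_add_pos_and_context Pairs WordPOSData SegmentAudio out) := by unfold Spec_add_pos_and_context; infer_instance

-- ===== CLAIM (what is proved, stated in full; the proofs are below) =====
def Claim_equal_add_pos_and_context : Prop := ∀ (Pairs : List (String × String × String)) (WordPOSData : List (String × String × String)) (SegmentAudio : List (List (String × String))), Dom_add_pos_and_context Pairs WordPOSData SegmentAudio → Pre_add_pos_and_context Pairs WordPOSData SegmentAudio → Spec_add_pos_and_context Pairs WordPOSData SegmentAudio (add_pos_and_context Pairs WordPOSData SegmentAudio)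


-- ===== LEMMAS AND PROOFS =====

-- A's list dedup preserves first matches: find? over the deduplicated list = find? over the original.
theorem find?_foldl_dedup {α : Type} [BEq α] [LawfulBEq α] (l acc : List α) (p : α → Bool) :
    ((l.foldl (fun acc w => if acc.contains w then acc else acc ++ [w]) acc).find? p)
      = (acc.find? p).or (l.find? p) := by
  induction l generalizing acc with
  | nil => simp
  | cons w l ih =>
    simp only [List.foldl_cons]
    by_cases hc : acc.contains w
    · simp only [hc, if_true, ih]
      by_cases hp : p w
      · have hmem : w ∈ acc := by simpa using hc
        have hsome : (acc.find? p).isSome := List.find?_isSome.mpr ⟨w, hmem, hp⟩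
        obtain ⟨v, hv⟩ := Option.isSome_iff_exists.mp hsome
        simp [hp, hv]
      · simp [hp]
    · simp only [hc, ih, List.find?_cons]
      by_cases hp : p w <;> simp [hp]

-- get? after a setdefault-fold = first matching key in the traversed list (B's POS dict build).
theorem get?_foldl_setdefault {α : Type} (key val : α → String) (l : List α) (d : PySem.Dict String String) (x : String) :
    ((l.foldl (fun d w => d.setdefault (key w) (val w)) d).get? x)
      = (d.get? x).or ((l.find? (fun w => key w == x)).map val) := by
  induction l generalizing d with
  | nil => simp
  | cons w l ih =>
    simp only [List.foldl_cons, ih, List.find?_cons]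
    by_cases hx : x = key w
    · subst hx
      rw [PySem.Dict.get?_setdefault_self]
      cases h : d.get? (key w) <;> simp [h]
    · rw [PySem.Dict.get?_setdefault_of_ne d (val w) hx]
      have : (key w == x) = false := by simpa using fun h => hx h.symm
      simp [this]

-- same, for a guarded setdefault-fold (B's audio dict build): first matching key among kept elements.
theorem get?_foldl_setdefault_if {α : Type} (cond : α → Bool) (key val : α → String) (l : List α) (d : PySem.Dict String String) (x : String) :
    ((l.foldl (fun d w => if cond w then d.setdefault (key w) (val w) else d) d).get? x)
      = (d.get? x).or (((l.filter cond).find? (fun w => key w == x)).map val) := by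
  induction l generalizing d with
  | nil => simp
  | cons w l ih =>
    simp only [List.foldl_cons]
    by_cases hcond : cond w
    · rw [if_pos hcond, ih, List.filter_cons_of_pos hcond]
      simp only [List.find?_cons]
      by_cases hx : x = key w
      · subst hx
        rw [PySem.Dict.get?_setdefault_self]
        cases h : d.get? (key w) <;> simp [h]
      · rw [PySem.Dict.get?_setdefault_of_ne d (val w) hx]
        have : (key w == x) = false := by simpa using fun h => hx h.symm
        simp [this]
    · rw [if_neg hcond, ih, List.filter_cons_of_neg (by simpa using hcond)]

-- A's audio scan is a find? over the segments.
theorem add_audio_context_eq_find? (Word Translation POS TextContext : String) (SegmentAudio : List (List (String × String))) :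
    add_audio_context Word Translation POS TextContext SegmentAudio
      = (Word, Translation, POS, TextContext,
          match SegmentAudio.find? (fun S => TextContext == (PySem.Dict.mk S).getD "text" "") with
          | some S => PySem.Str.replace ((PySem.Dict.mk S).getD "file" "") ".wav" ".mp3"
          | none => "") := by
  induction SegmentAudio with
  | nil => simp [add_audio_context]
  | cons S rest ih =>
    by_cases h : TextContext == (PySem.Dict.mk S).getD "text" ""
    · simp [add_audio_context, h]
    · simp only [Bool.not_eq_true] at h
      simp [add_audio_context, h, ih]

-- On a scan that Python A completes, B's filtered first match = A's first match.
theorem find?_filter_eq_of_scanOK (SegmentAudio : List (List (String × String))) (c : String)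
    (h : pvScanOK SegmentAudio c) :
    ((SegmentAudio.filter (fun s => (PySem.Dict.mk s).contains "text" && (PySem.Dict.mk s).contains "file")).find?
        (fun s => (PySem.Dict.mk s).getD "text" "" == c))
      = SegmentAudio.find? (fun S => c == (PySem.Dict.mk S).getD "text" "") := by
  induction SegmentAudio with
  | nil => simp
  | cons S rest ih =>
    by_cases hstop : (!(PySem.Dict.mk S).contains "text" || ((PySem.Dict.mk S).getD "text" "" == c)) = true
    · have hS := h S (List.find?_cons_of_pos (p := fun (S : List (String × String)) => !(PySem.Dict.mk S).contains "text" || ((PySem.Dict.mk S).getD "text" "" == c)) hstop)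
      have htext : (PySem.Dict.mk S).contains "text" = true := hS.1
      have hmatch : ((PySem.Dict.mk S).getD "text" "" == c) = true := by
        simpa [htext] using hstop
      have hmatch' : (c == (PySem.Dict.mk S).getD "text" "") = true := by
        rw [Bool.beq_comm]; exact hmatch
      have hboth : ((PySem.Dict.mk S).contains "text" && (PySem.Dict.mk S).contains "file") = true := by
        rw [htext, hS.2]; rfl
      rw [List.filter_cons_of_pos (p := fun (s : List (String × String)) => (PySem.Dict.mk s).contains "text" && (PySem.Dict.mk s).contains "file") hboth,
          List.find?_cons_of_pos (p := fun (s : List (String × String)) => (PySem.Dict.mk s).getD "text" "" == c) hmatch,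
          List.find?_cons_of_pos (p := fun (S : List (String × String)) => c == (PySem.Dict.mk S).getD "text" "") hmatch']
    · have htext : (PySem.Dict.mk S).contains "text" = true := by
        by_contra hx
        simp only [Bool.not_eq_true] at hx
        simp [hx] at hstop
      have hne : ((PySem.Dict.mk S).getD "text" "" == c) = false := by
        by_contra hx
        simp only [Bool.not_eq_false] at hx
        simp [hx] at hstop
      have hne' : (c == (PySem.Dict.mk S).getD "text" "") = false := by
        rw [Bool.beq_comm]; exact hne
      have hrest : pvScanOK rest c := by
        intro T hT
        exact h T (by rw [List.find?_cons_of_neg (p := fun (S : List (String × String)) => !(PySem.Dict.mk S).contains "text" || ((PySem.Dict.mk S).getD "text" "" == c)) hstop]; exact hT)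
      rw [List.find?_cons_of_neg (p := fun (S : List (String × String)) => c == (PySem.Dict.mk S).getD "text" "") (by simp [hne']), ← ih hrest]
      by_cases hfile : (PySem.Dict.mk S).contains "file"
      · have hboth : ((PySem.Dict.mk S).contains "text" && (PySem.Dict.mk S).contains "file") = true := by
          rw [htext, hfile]; rfl
        rw [List.filter_cons_of_pos (p := fun (s : List (String × String)) => (PySem.Dict.mk s).contains "text" && (PySem.Dict.mk s).contains "file") hboth, List.find?_cons_of_neg (p := fun (s : List (String × String)) => (PySem.Dict.mk s).getD "text" "" == c) (by simp [hne])]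
      · rw [List.filter_cons_of_neg (p := fun (s : List (String × String)) => (PySem.Dict.mk s).contains "text" && (PySem.Dict.mk s).contains "file") (by simp [hfile])]

-- B's audio dict looked up at a safely scanned context = A's audio scan result (last component).
theorem audio_getD_eq (SegmentAudio : List (List (String × String))) (c : String)
    (h : pvScanOK SegmentAudio c) :
    ((SegmentAudio.foldl (fun d s =>
        if (PySem.Dict.mk s).contains "text" && (PySem.Dict.mk s).contains "file" then
          d.setdefault ((PySem.Dict.mk s).getD "text" "")
            (PySem.Str.replace ((PySem.Dict.mk s).getD "file" "") ".wav" ".mp3")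
        else d) PySem.Dict.empty).getD c "")
      = (match SegmentAudio.find? (fun S => c == (PySem.Dict.mk S).getD "text" "") with
          | some S => PySem.Str.replace ((PySem.Dict.mk S).getD "file" "") ".wav" ".mp3"
          | none => "") := by
  rw [PySem.Dict.getD_eq_get?_getD,
      get?_foldl_setdefault_if (fun s => (PySem.Dict.mk s).contains "text" && (PySem.Dict.mk s).contains "file")
        (fun s => (PySem.Dict.mk s).getD "text" "")
        (fun s => PySem.Str.replace ((PySem.Dict.mk s).getD "file" "") ".wav" ".mp3") SegmentAudio PySem.Dict.empty c,
      find?_filter_eq_of_scanOK SegmentAudio c h]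
  cases SegmentAudio.find? (fun S => c == (PySem.Dict.mk S).getD "text" "") <;> simp

theorem add_pos_and_context_spec : Claim_equal_add_pos_and_context := by
  intro Pairs WordPOSData SegmentAudio _hDom hPre
  unfold Spec_add_pos_and_context add_pos_and_context add_pos_and_context_alt
  apply List.foldl_ext
  intro acc Pair hmem
  by_cases hW : WordPOSData.isEmpty
  · have hscan : pvScanOK SegmentAudio Pair.2.2 :=
      hPre Pair hmem (Or.inl (List.isEmpty_iff.mp hW))
    simp only [hW, Bool.not_true, Bool.false_eq_true, if_false,
      add_audio_context_eq_find? Pair.1 Pair.2.1 "" Pair.2.2 SegmentAudio,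
      audio_getD_eq SegmentAudio Pair.2.2 hscan]
  · simp only [hW, Bool.not_false, if_true]
    rw [find?_foldl_dedup WordPOSData [] (fun Word => Word.1 == Pair.2.1),
        get?_foldl_setdefault (fun w => w.1) (fun w => w.2.2) WordPOSData PySem.Dict.empty Pair.2.1]
    simp only [List.find?_nil, Option.or, PySem.Dict.get?_empty]
    cases h : WordPOSData.find? (fun Word => Word.1 == Pair.2.1) with
    | none => simp
    | some Word =>
      have hWmem : Word ∈ WordPOSData ∧ (Word.1 == Pair.2.1) = true :=
        ⟨List.mem_of_find?_eq_some h, List.find?_some (p := fun (Word : String × String × String) => Word.1 == Pair.2.1) h⟩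
      have hscan : pvScanOK SegmentAudio Pair.2.2 :=
        hPre Pair hmem (Or.inr ⟨Word, hWmem.1, by simpa using hWmem.2⟩)
      simp only [Option.map_some,
        add_audio_context_eq_find? Pair.1 Pair.2.1 Word.2.2 Pair.2.2 SegmentAudio,
        audio_getD_eq SegmentAudio Pair.2.2 hscan]
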